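-- pv_equiv track=rewrite | github.com/LucasStrand/cowboygameboy | tools/generate_desert_ground_tileset.py | draw_plank_tile
-- ===== SOURCE A (Python) =====
-- TILE = 16
--
-- TRANSPARENT = (0, 0, 0, 0)
--
-- SAND_LIGHT = (250, 231, 172, 255)
--
-- SAND_BASE = (236, 198, 121, 255)
--
-- WOOD_LIGHT = (173, 121, 73, 255)
--
-- WOOD_MID = (132, 88, 51, 255)
--
-- WOOD_DARK = (93, 58, 36, 255)
--
-- def make_image(width, height, color=TRANSPARENT):
--     return [color] * (width * height)
--
-- def index(width, x, y):
--     return y * width + x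
--
-- def lighten(color, amount):
--     return (
--         min(255, color[0] + amount),
--         min(255, color[1] + amount),
--         min(255, color[2] + amount),
--         color[3],
--     )
--
-- def draw_plank_tile(kind):
--     tile = make_image(TILE, TILE)
--     board_top = 2
--     board_bottom = 7
--
--     for y in range(board_top, board_bottom + 1):
--         for x in range(TILE):
--             if y == board_top:
--                 color = lighten(WOOD_LIGHT, 10) if x % 5 == 0 else WOOD_LIGHT
--             elif y == board_bottom:
--                 color = WOOD_DARK
--             elif y == board_top + 1:
--                 color = SAND_BASE if (x + y) % 6 else SAND_LIGHT
--             else: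
--                 color = WOOD_MID if (x + y) % 4 else WOOD_LIGHT
--             tile[index(TILE, x, y)] = color
--
--     for x in (5, 10):
--         for y in range(board_top + 1, board_bottom):
--             tile[index(TILE, x, y)] = WOOD_DARK
--
--     for x in range(1, TILE - 1):
--         if x % 4 == 1:
--             tile[index(TILE, x, board_top + 1)] = SAND_LIGHT
--
--     if kind == "left":
--         for y in range(board_top + 1, board_bottom):
--             tile[index(TILE, 0, y)] = WOOD_DARK
--             tile[index(TILE, 1, y)] = WOOD_MID
--         tile[index(TILE, 0, board_top)] = TRANSPARENT
--         tile[index(TILE, 0, board_top + 1)] = TRANSPARENT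
--     elif kind == "right":
--         for y in range(board_top + 1, board_bottom):
--             tile[index(TILE, TILE - 1, y)] = WOOD_DARK
--             tile[index(TILE, TILE - 2, y)] = WOOD_MID
--         tile[index(TILE, TILE - 1, board_top)] = TRANSPARENT
--         tile[index(TILE, TILE - 1, board_top + 1)] = TRANSPARENT
--
--     return tile
-- ===== SOURCE B (Python) =====
-- TILE = 16
-- TRANSPARENT = (0, 0, 0, 0)
-- SAND_LIGHT = (250, 231, 172, 255)
-- SAND_BASE = (236, 198, 121, 255)
-- WOOD_LIGHT = (173, 121, 73, 255)
-- WOOD_MID = (132, 88, 51, 255)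
-- WOOD_DARK = (93, 58, 36, 255)
--
-- def lighten(color, amount):
--     return (
--         min(255, color[0] + amount),
--         min(255, color[1] + amount),
--         min(255, color[2] + amount),
--         color[3],
--     )
--
-- def _pixel(kind, x, y):
--     # highest precedence: left/right edge overrides
--     if kind == "left":
--         if x == 0 and y in (2, 3):
--             return TRANSPARENT
--         if 3 <= y <= 6:
--             if x == 0:
--                 return WOOD_DARK
--             if x == 1:
--                 return WOOD_MID
--     elif kind == "right":
--         if x == TILE - 1 and y in (2, 3):
--             return TRANSPARENT
--         if 3 <= y <= 6:
--             if x == TILE - 1: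
--                 return WOOD_DARK
--             if x == TILE - 2:
--                 return WOOD_MID
--     # sand highlights on row 3
--     if y == 3 and 1 <= x <= TILE - 2 and x % 4 == 1:
--         return SAND_LIGHT
--     # dark plank seams at columns 5 and 10
--     if 3 <= y <= 6 and x in (5, 10):
--         return WOOD_DARK
--     # base row fills
--     if y == 2:
--         return lighten(WOOD_LIGHT, 10) if x % 5 == 0 else WOOD_LIGHT
--     if y == 3:
--         return SAND_BASE if (x + y) % 6 else SAND_LIGHT
--     if 4 <= y <= 6:
--         return WOOD_MID if (x + y) % 4 else WOOD_LIGHT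
--     if y == 7:
--         return WOOD_DARK
--     return TRANSPARENT
--
-- def draw_plank_tile(kind):
--     return [_pixel(kind, x, y) for y in range(TILE) for x in range(TILE)]
-- ===== Notes on version B (the rewrite author's own statement) =====
-- stated objective: alternative
-- what changed: Replaced A's five sequential paint-then-overwrite passes over a mutable pixel buffer with a single comprehension that computes each pixel's final color directly via one precedence function.
import Mathlib
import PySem

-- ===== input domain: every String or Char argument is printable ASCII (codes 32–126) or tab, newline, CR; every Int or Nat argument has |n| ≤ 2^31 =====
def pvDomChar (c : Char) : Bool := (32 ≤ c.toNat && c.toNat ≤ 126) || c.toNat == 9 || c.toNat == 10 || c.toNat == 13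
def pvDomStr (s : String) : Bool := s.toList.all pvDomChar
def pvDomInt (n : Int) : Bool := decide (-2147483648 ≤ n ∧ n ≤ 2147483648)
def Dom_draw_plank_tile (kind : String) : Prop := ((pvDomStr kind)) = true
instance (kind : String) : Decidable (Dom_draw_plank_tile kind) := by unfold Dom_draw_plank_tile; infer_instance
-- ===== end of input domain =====

-- B replaces A's paint-then-overwrite passes by a single pass computing each pixel's
-- final color directly via a precedence function (objective: alternative decomposition).

-- ===== PORT A =====
def pvTRANSPARENT : List Int := [0, 0, 0, 0]
def pvSAND_LIGHT : List Int := [250, 231, 172, 255]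
def pvSAND_BASE : List Int := [236, 198, 121, 255]
def pvWOOD_LIGHT : List Int := [173, 121, 73, 255]
def pvWOOD_MID : List Int := [132, 88, 51, 255]
def pvWOOD_DARK : List Int := [93, 58, 36, 255]

def pvMakeImage (width height : Nat) (color : List Int) : List (List Int) :=
  List.replicate (width * height) color

def pvIndex (width x y : Nat) : Nat := y * width + x

def pvLighten (color : List Int) (amount : Int) : List Int :=
  [min 255 (color.getD 0 0 + amount),
   min 255 (color.getD 1 0 + amount),
   min 255 (color.getD 2 0 + amount),
   color.getD 3 0]

def draw_plank_tile (kind : String) : List (List Int) :=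
  let tile := pvMakeImage 16 16 pvTRANSPARENT
  -- for y in range(2, 8): for x in range(16): row fill
  let tile := (List.range' 2 6).foldl (fun t y =>
    (List.range 16).foldl (fun t x =>
      let color :=
        if y == 2 then (if x % 5 == 0 then pvLighten pvWOOD_LIGHT 10 else pvWOOD_LIGHT)
        else if y == 7 then pvWOOD_DARK
        else if y == 3 then (if (x + y) % 6 ≠ 0 then pvSAND_BASE else pvSAND_LIGHT)
        else (if (x + y) % 4 ≠ 0 then pvWOOD_MID else pvWOOD_LIGHT)
      t.set (pvIndex 16 x y) color) t) tile
  -- for x in (5, 10): for y in range(3, 7)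
  let tile := [5, 10].foldl (fun t x =>
    (List.range' 3 4).foldl (fun t y => t.set (pvIndex 16 x y) pvWOOD_DARK) t) tile
  -- for x in range(1, 15): if x % 4 == 1
  let tile := (List.range' 1 14).foldl (fun t x =>
    if x % 4 == 1 then t.set (pvIndex 16 x 3) pvSAND_LIGHT else t) tile
  if kind = "left" then
    let tile := (List.range' 3 4).foldl (fun t y =>
      (t.set (pvIndex 16 0 y) pvWOOD_DARK).set (pvIndex 16 1 y) pvWOOD_MID) tile
    let tile := tile.set (pvIndex 16 0 2) pvTRANSPARENT
    tile.set (pvIndex 16 0 3) pvTRANSPARENT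
  else if kind = "right" then
    let tile := (List.range' 3 4).foldl (fun t y =>
      (t.set (pvIndex 16 15 y) pvWOOD_DARK).set (pvIndex 16 14 y) pvWOOD_MID) tile
    let tile := tile.set (pvIndex 16 15 2) pvTRANSPARENT
    tile.set (pvIndex 16 15 3) pvTRANSPARENT
  else tile

-- ===== PORT B =====
def pvPixel (kind : String) (x y : Nat) : List Int :=
  -- highest precedence: left/right edge overrides
  if kind = "left" ∧ x == 0 ∧ (y == 2 ∨ y == 3) then pvTRANSPARENT
  else if kind = "left" ∧ 3 ≤ y ∧ y ≤ 6 ∧ x == 0 then pvWOOD_DARK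
  else if kind = "left" ∧ 3 ≤ y ∧ y ≤ 6 ∧ x == 1 then pvWOOD_MID
  else if kind = "right" ∧ x == 15 ∧ (y == 2 ∨ y == 3) then pvTRANSPARENT
  else if kind = "right" ∧ 3 ≤ y ∧ y ≤ 6 ∧ x == 15 then pvWOOD_DARK
  else if kind = "right" ∧ 3 ≤ y ∧ y ≤ 6 ∧ x == 14 then pvWOOD_MID
  -- sand highlights on row 3
  else if y == 3 ∧ 1 ≤ x ∧ x ≤ 14 ∧ x % 4 == 1 then pvSAND_LIGHT
  -- dark plank seams at columns 5 and 10
  else if 3 ≤ y ∧ y ≤ 6 ∧ (x == 5 ∨ x == 10) then pvWOOD_DARK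
  -- base row fills
  else if y == 2 then (if x % 5 == 0 then pvLighten pvWOOD_LIGHT 10 else pvWOOD_LIGHT)
  else if y == 3 then (if (x + y) % 6 ≠ 0 then pvSAND_BASE else pvSAND_LIGHT)
  else if 4 ≤ y ∧ y ≤ 6 then (if (x + y) % 4 ≠ 0 then pvWOOD_MID else pvWOOD_LIGHT)
  else if y == 7 then pvWOOD_DARK
  else pvTRANSPARENT

def draw_plank_tile_alt (kind : String) : List (List Int) :=
  (List.range 16).flatMap (fun y => (List.range 16).map (fun x => pvPixel kind x y))

-- ===== PRECONDITION & SPEC =====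
def Spec_draw_plank_tile (kind : String) (out : List (List Int)) : Prop := out = draw_plank_tile_alt kind
instance (kind : String) (out : List (List Int)) : Decidable (Spec_draw_plank_tile kind out) := by unfold Spec_draw_plank_tile; infer_instance

-- ===== CLAIM (what is proved, stated in full; the proofs are below) =====
def Claim_equal_draw_plank_tile : Prop := ∀ (kind : String), Dom_draw_plank_tile kind → Spec_draw_plank_tile kind (draw_plank_tile kind)

-- ===== LEMMAS AND PROOFS =====

-- ===== VERDICT (by name: the statement is the Claim_ definition above) =====
set_option maxRecDepth 100000 in
theorem draw_plank_tile_spec : Claim_equal_draw_plank_tile := by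
  intro kind _
  unfold Spec_draw_plank_tile
  by_cases h1 : kind = "left"
  · subst h1; decide
  · by_cases h2 : kind = "right"
    · subst h2; decide
    · simp only [draw_plank_tile, draw_plank_tile_alt, pvPixel, h1, h2, false_and,
        if_false]
      decide
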